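-- pv_equiv track=rewrite | github.com/olivierfriard/BORIS | boris/transitions.py | behavioral_strings_analysis
-- ===== SOURCE A (Python) =====
-- def behavioral_strings_analysis(strings, behav_seq_separator):
--     """
--     Analyze behavioral strings
--     """
--
--     rows = strings[:]
--     sequences = []
--     for row in rows:
--         if behav_seq_separator:
--             r = row.strip().split(behav_seq_separator)
--         else:
--             r = list(row.strip())
--
--         sequences.append(r)
--
--     # extract unique behaviors
--     unique_behaviors = []
--     for seq in sequences:
--         for c in seq:
--             if c not in unique_behaviors:
--                 unique_behaviors.append(c)
--
--     unique_behaviors.sort()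
--
--     return sequences, unique_behaviors
-- ===== SOURCE B (Python) =====
-- def behavioral_strings_analysis(strings, behav_seq_separator):
--     """
--     Analyze behavioral strings
--     """
--
--     if behav_seq_separator:
--         sequences = [row.strip().split(behav_seq_separator) for row in strings]
--     else:
--         sequences = [list(row.strip()) for row in strings]
--
--     # sort all behaviors once, then keep each run's first element (adjacent dedup)
--     flat = [c for seq in sequences for c in seq]
--     flat.sort()
--
--     unique_behaviors = []
--     for c in flat:
--         if not unique_behaviors or c != unique_behaviors[-1]:
--             unique_behaviors.append(c)
--
--     return sequences, unique_behaviors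
-- ===== Notes on version B (the rewrite author's own statement) =====
-- stated objective: faster
-- what changed: The nested membership scan that collects unique behaviors (O(n^2) 'if c not in unique' over a growing list) is replaced by flattening all sequences, sorting once, and a single linear pass that keeps each element only when it differs from the last one kept; sequence building becomes a comprehension.
import Mathlib
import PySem

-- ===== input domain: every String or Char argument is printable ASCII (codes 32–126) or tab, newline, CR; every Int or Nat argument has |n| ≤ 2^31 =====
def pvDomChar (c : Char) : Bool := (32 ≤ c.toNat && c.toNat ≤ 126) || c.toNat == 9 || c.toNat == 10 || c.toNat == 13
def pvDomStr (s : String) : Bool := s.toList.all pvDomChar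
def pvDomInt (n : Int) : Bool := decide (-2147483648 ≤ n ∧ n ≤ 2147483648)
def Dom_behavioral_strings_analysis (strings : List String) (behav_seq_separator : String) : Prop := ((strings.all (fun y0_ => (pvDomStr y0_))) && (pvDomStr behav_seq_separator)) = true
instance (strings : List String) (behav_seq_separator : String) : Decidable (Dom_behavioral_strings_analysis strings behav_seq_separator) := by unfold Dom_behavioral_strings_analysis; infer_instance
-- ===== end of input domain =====

-- B replaces A's quadratic 'not in' scan for unique behaviors by a single sort followed by
-- one linear adjacent-dedup pass (and builds the sequences with a map instead of an append loop).


-- ===== PORT A =====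
def behavioral_strings_analysis (strings : List String) (behav_seq_separator : String) : List (List String) × List String :=
  let rows := strings
  let sequences := rows.foldl (fun acc row =>
    let r := if behav_seq_separator ≠ "" then
        (PySem.Chars.splitOn (PySem.Str.strip row).toList behav_seq_separator.toList).map (fun cs => String.ofList cs)
      else
        (PySem.Str.strip row).toList.map (fun c => String.singleton c)
    acc ++ [r]) []
  let unique_behaviors := sequences.foldl (fun ub seq =>
    seq.foldl (fun ub2 c => if c ∈ ub2 then ub2 else ub2 ++ [c]) ub) []
  (sequences, PySem.List.sorted unique_behaviors (fun x => x) false)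

-- ===== PORT B =====
def behavioral_strings_analysis_alt (strings : List String) (behav_seq_separator : String) : List (List String) × List String :=
  let sequences :=
    if behav_seq_separator ≠ "" then
      strings.map (fun row => (PySem.Chars.splitOn (PySem.Str.strip row).toList behav_seq_separator.toList).map (fun cs => String.ofList cs))
    else
      strings.map (fun row => (PySem.Str.strip row).toList.map (fun c => String.singleton c))
  let flat := sequences.flatMap (fun seq => seq)
  let sortedFlat := PySem.List.sorted flat (fun x => x) false
  let unique_behaviors := sortedFlat.foldl (fun ub c =>
    if ub = [] ∨ ub.getLast? ≠ some c then ub ++ [c] else ub) []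
  (sequences, unique_behaviors)

-- ===== PRECONDITION & SPEC =====
def Spec_behavioral_strings_analysis (strings : List String) (behav_seq_separator : String) (out : List (List String) × List String) : Prop := out = behavioral_strings_analysis_alt strings behav_seq_separator
instance (strings : List String) (behav_seq_separator : String) (out : List (List String) × List String) : Decidable (Spec_behavioral_strings_analysis strings behav_seq_separator out) := by unfold Spec_behavioral_strings_analysis; infer_instance

-- ===== CLAIM (what is proved, stated in full; the proofs are below) =====
def Claim_equal_behavioral_strings_analysis : Prop := ∀ (strings : List String) (behav_seq_separator : String), Dom_behavioral_strings_analysis strings behav_seq_separator → Spec_behavioral_strings_analysis strings behav_seq_separator (behavioral_strings_analysis strings behav_seq_separator)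

-- ===== LEMMAS AND PROOFS =====

-- adjacent dedup after a kept element p (proof-side characterization of B's loop)
def pvDA (p : String) : List String → List String
  | [] => []
  | c :: t => if c = p then pvDA p t else c :: pvDA c t

theorem pv_foldl_dstep (l : List String) : ∀ (acc : List String) (p : String),
    List.foldl (fun ub c => if ub = [] ∨ ub.getLast? ≠ some c then ub ++ [c] else ub) (acc ++ [p]) l
      = acc ++ [p] ++ pvDA p l := by
  induction l with
  | nil => intro acc p; simp [pvDA]
  | cons c t ih =>
    intro acc p
    by_cases h : c = p
    · subst h
      simp [pvDA, ih acc c]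
    · have : ((acc ++ [p]) = [] ∨ (acc ++ [p]).getLast? ≠ some c) := by
        right
        simp
        exact fun hh => h hh.symm
      simp only [List.foldl_cons, if_pos this, pvDA, if_neg h]
      have := ih (acc ++ [p]) c
      simpa [List.append_assoc] using this

theorem pv_mem_pvDA (l : List String) : ∀ (p x : String), x ∈ p :: pvDA p l ↔ x ∈ p :: l := by
  induction l with
  | nil => intro p x; simp [pvDA]
  | cons c t ih =>
    intro p x
    by_cases h : c = p
    · subst h
      simpa [pvDA] using (ih c x).trans (by simp)
    · simp only [pvDA, if_neg h]
      constructor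
      · intro hx
        rcases List.mem_cons.mp hx with rfl | hx
        · exact List.mem_cons_self
        · rcases (ih c x).mp hx with h1 | h2 <;> simp_all
      · intro hx
        rcases List.mem_cons.mp hx with rfl | hx
        · exact List.mem_cons_self
        · exact List.mem_cons_of_mem _ ((ih c x).mpr hx)

theorem pv_pairwise_pvDA (l : List String) : ∀ (p : String),
    (p :: l).Pairwise (· ≤ ·) → (p :: pvDA p l).Pairwise (· < ·) := by
  induction l with
  | nil => intro p _; simp [pvDA]
  | cons c t ih =>
    intro p hp
    rcases List.pairwise_cons.mp hp with ⟨hple, hct⟩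
    by_cases h : c = p
    · subst h
      simp only [pvDA, if_true]
      exact ih c (List.pairwise_cons.mpr ⟨fun y hy => hple y (List.mem_cons_of_mem _ hy), (List.pairwise_cons.mp hct).2⟩)
    · have hpc : p < c := lt_of_le_of_ne (hple c List.mem_cons_self) (Ne.symm h)
      have hrec : (c :: pvDA c t).Pairwise (· < ·) := ih c hct
      simp only [pvDA, if_neg h]
      refine List.pairwise_cons.mpr ⟨?_, hrec⟩
      intro y hy
      rcases List.mem_cons.mp hy with rfl | hy
      · exact hpc
      · exact lt_trans hpc ((List.pairwise_cons.mp hrec).1 y hy)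

-- A's accumulator: membership and nodup
theorem pv_mem_foldl_add (l : List String) : ∀ (acc : List String) (x : String),
    x ∈ List.foldl (fun ub2 c => if c ∈ ub2 then ub2 else ub2 ++ [c]) acc l ↔ x ∈ acc ∨ x ∈ l := by
  induction l with
  | nil => intro acc x; simp
  | cons c t ih =>
    intro acc x
    by_cases h : c ∈ acc
    · simp only [List.foldl_cons, if_pos h, ih]
      constructor
      · rintro (hx | hx) <;> simp_all
      · rintro (hx | hx)
        · exact Or.inl hx
        · rcases List.mem_cons.mp hx with rfl | hx
          · exact Or.inl h
          · exact Or.inr hx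
    · simp only [List.foldl_cons, if_neg h, ih]
      simp [List.mem_append, or_assoc]

theorem pv_nodup_foldl_add (l : List String) : ∀ (acc : List String), acc.Nodup →
    (List.foldl (fun ub2 c => if c ∈ ub2 then ub2 else ub2 ++ [c]) acc l).Nodup := by
  induction l with
  | nil => intro acc h; simpa
  | cons c t ih =>
    intro acc h
    by_cases hc : c ∈ acc
    · simpa [hc] using ih acc h
    · simp only [List.foldl_cons, if_neg hc]
      exact ih (acc ++ [c]) (by simp [List.nodup_append, h]; exact fun a ha hac => hc (hac ▸ ha))

-- the two parse branches, merged pointwise (used by the proof only)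
theorem pv_unique_eq (seqs : List (List String)) :
    PySem.List.sorted (seqs.foldl (fun ub seq => seq.foldl (fun ub2 c => if c ∈ ub2 then ub2 else ub2 ++ [c]) ub) []) (fun x => x) false
      = (PySem.List.sorted (seqs.flatMap (fun seq => seq)) (fun x => x) false).foldl
          (fun ub c => if ub = [] ∨ ub.getLast? ≠ some c then ub ++ [c] else ub) [] := by
  have hflat : seqs.flatMap (fun seq => seq) = seqs.flatten := by
    simp
  rw [hflat, ← List.foldl_flatten]
  rcases hsort : PySem.List.sorted seqs.flatten (fun x => x) false with _ | ⟨c, t⟩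
  · have h0 : seqs.flatten = [] := (PySem.List.sorted_eq_nil_iff _ _ _).mp hsort
    rw [h0]
    simp only [List.foldl_nil]
    exact (PySem.List.sorted_eq_nil_iff _ _ _).mpr rfl
  · have h1 : List.foldl (fun ub c => if ub = [] ∨ ub.getLast? ≠ some c then ub ++ [c] else ub) [] (c :: t)
        = c :: pvDA c t := by
      rw [List.foldl_cons]
      simp only [List.nil_append]
      simpa using pv_foldl_dstep t [] c
    rw [h1]
    have hple : (c :: t).Pairwise (· ≤ ·) := by
      have := PySem.List.sorted_pairwise seqs.flatten (fun x => x)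
      rwa [hsort] at this
    have hlt : (c :: pvDA c t).Pairwise (· < ·) := pv_pairwise_pvDA t c hple
    apply PySem.List.sorted_eq_of_perm_of_pairwise_lt
    · rw [List.perm_ext_iff_of_nodup (hlt.imp ne_of_lt)
        (pv_nodup_foldl_add seqs.flatten [] List.nodup_nil)]
      intro x
      rw [pv_mem_pvDA t c x, pv_mem_foldl_add seqs.flatten [] x, ← hsort,
        PySem.List.mem_sorted]
      simp
    · exact hlt

theorem pv_main (strings : List String) (sep : String) :
    behavioral_strings_analysis strings sep = behavioral_strings_analysis_alt strings sep := by
  simp only [behavioral_strings_analysis, behavioral_strings_analysis_alt]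
  by_cases hs : sep = ""
  · simp only [hs, ne_eq, not_true_eq_false, if_false,
      PySem.List.foldl_append_singleton_eq_map, List.nil_append]
    rw [pv_unique_eq]
  · simp only [ne_eq, hs, not_false_eq_true, if_true,
      PySem.List.foldl_append_singleton_eq_map, List.nil_append]
    rw [pv_unique_eq]

-- ===== VERDICT (by name: the statement is the Claim_ definition above) =====
theorem behavioral_strings_analysis_spec : Claim_equal_behavioral_strings_analysis := by
  intro strings sep _
  exact pv_main strings sep
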